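-- pv_equiv track=rewrite | github.com/prupke2/advent_of_code | 2020/day6/day6.py | compare_char_list
-- ===== SOURCE A (Python) =====
-- def split_characters(text):
--   return [char for char in text]
--
-- def compare_char_list(combined_char_set, forms):
--   for i, form in enumerate(forms):
--     if form == '':
--       return len(combined_char_set)
--     char_set = set()
--     for char in split_characters(forms[i]):
--       char_set.add(char)
--     combined_char_set = combined_char_set.intersection(char_set)
--   return len(combined_char_set)
-- ===== SOURCE B (Python) =====
-- def compare_char_list(combined_char_set, forms):
--   form_sets = []
--   for form in forms:
--     if form == '':
--       break
--     form_sets.append(set(form))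
--   count = 0
--   for c in combined_char_set:
--     if all(c in s for s in form_sets):
--       count += 1
--   return count
-- ===== Notes on version B (the rewrite author's own statement) =====
-- stated objective: alternative
-- what changed: Replaces the progressive set-intersection fold over forms with a two-phase element-wise count: first collect each form's char set (stopping at the first empty form), then count the candidate chars that belong to every collected set.
import Mathlib
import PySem

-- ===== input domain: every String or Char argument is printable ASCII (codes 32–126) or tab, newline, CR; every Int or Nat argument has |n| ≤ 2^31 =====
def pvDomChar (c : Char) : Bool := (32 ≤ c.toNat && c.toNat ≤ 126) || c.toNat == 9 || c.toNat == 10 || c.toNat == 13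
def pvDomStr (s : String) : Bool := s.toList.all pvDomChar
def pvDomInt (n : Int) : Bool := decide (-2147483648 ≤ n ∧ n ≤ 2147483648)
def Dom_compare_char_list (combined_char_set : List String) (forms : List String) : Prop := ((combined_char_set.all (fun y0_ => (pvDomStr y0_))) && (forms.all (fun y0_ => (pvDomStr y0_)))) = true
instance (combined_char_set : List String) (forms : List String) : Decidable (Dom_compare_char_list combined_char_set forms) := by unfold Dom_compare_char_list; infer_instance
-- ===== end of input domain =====

-- B replaces A's progressive set-intersection fold with a two-phase count
-- (collect form char-sets, then count members of all of them); objective: alternative decomposition.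

-- ===== PORT A =====
-- split_characters(text) = [char for char in text]
def split_characters (text : String) : List String :=
  text.toList.map (fun c => String.mk [c])

-- the 'for i, form in enumerate(forms)' loop of A, carrying combined_char_set
def compare_char_list_loop (combined_char_set : PySem.Set String) (forms : List String) : Int :=
  match forms with
  | [] => (combined_char_set.length : Int)
  | form :: rest =>
    if form = "" then (combined_char_set.length : Int)
    else
      -- char_set = set(); for char in split_characters(forms[i]): char_set.add(char)
      let char_set : PySem.Set String :=
        (split_characters form).foldl PySem.Set.add PySem.Set.empty
      compare_char_list_loop (PySem.Set.inter combined_char_set char_set) rest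

def compare_char_list (combined_char_set : List String) (forms : List String) : Int :=
  compare_char_list_loop combined_char_set forms

-- ===== PORT B =====
-- collect set(form) for each form, breaking at the first empty form
def collect_form_sets (forms : List String) : List (PySem.Set String) :=
  match forms with
  | [] => []
  | form :: rest =>
    if form = "" then []
    else PySem.Set.ofList (form.toList.map (fun c => String.mk [c])) :: collect_form_sets rest

def compare_char_list_alt (combined_char_set : List String) (forms : List String) : Int :=
  let form_sets := collect_form_sets forms
  combined_char_set.foldl
    (fun count c => if form_sets.all (fun s => PySem.Set.contains s c) then count + 1 else count) 0

-- ===== PRECONDITION & SPEC =====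
def Spec_compare_char_list (combined_char_set : List String) (forms : List String) (out : Int) : Prop := out = compare_char_list_alt combined_char_set forms
instance (combined_char_set : List String) (forms : List String) (out : Int) : Decidable (Spec_compare_char_list combined_char_set forms out) := by unfold Spec_compare_char_list; infer_instance

-- ===== CLAIM (what is proved, stated in full; the proofs are below) =====
def Claim_equal_compare_char_list : Prop := ∀ (combined_char_set : List String) (forms : List String), Dom_compare_char_list combined_char_set forms → Spec_compare_char_list combined_char_set forms (compare_char_list combined_char_set forms)

-- ===== LEMMAS AND PROOFS =====

-- ===== VERDICT (by name: the statement is the Claim_ definition above) =====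
lemma foldl_count_eq_countP (p : String → Bool) (l : List String) (acc : Int) :
    l.foldl (fun count c => if p c then count + 1 else count) acc
      = acc + (l.countP p : Int) := by
  induction l generalizing acc with
  | nil => simp
  | cons x xs ih =>
    simp only [List.foldl_cons, List.countP_cons, ih]
    by_cases h : p x = true <;> simp [h] <;> ring

lemma loop_eq_countP (forms : List String) (combined : List String) :
    compare_char_list_loop combined forms
      = (combined.countP (fun c => (collect_form_sets forms).all
          (fun s => PySem.Set.contains s c)) : Int) := by
  induction forms generalizing combined with
  | nil =>
    simp [compare_char_list_loop, collect_form_sets]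
  | cons form rest ih =>
    by_cases h : form = ""
    · simp [compare_char_list_loop, collect_form_sets, h]
    · have hinter : PySem.Set.inter combined
          ((split_characters form).foldl PySem.Set.add PySem.Set.empty)
          = combined.filter (fun c =>
              PySem.Set.contains ((split_characters form).foldl PySem.Set.add PySem.Set.empty) c) := rfl
      simp only [compare_char_list_loop, h, if_false, ih, hinter, collect_form_sets,
        List.countP_filter, List.all_cons]
      have hfold : List.foldl PySem.Set.add ([] : PySem.Set String)
          (form.toList.map (fun ch => String.mk [ch]))
          = PySem.Set.ofList (form.toList.map (fun ch => String.mk [ch])) := rfl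
      congr 1
      apply List.countP_congr
      intro c _
      simp only [split_characters]
      simp [Bool.and_comm]
      intro _
      rw [hfold]
      simp [PySem.Set.mem_ofList]

theorem compare_char_list_spec : Claim_equal_compare_char_list := by
  intro combined forms _
  unfold Spec_compare_char_list compare_char_list compare_char_list_alt
  rw [loop_eq_countP, foldl_count_eq_countP]
  simp
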